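-- pv_equiv track=rewrite | github.com/thinhntr/cp | leetcode/Number of Excellent Pairs.py | countExcellentPairs
-- ===== SOURCE A (Python) =====
-- from collections import Counter
-- from typing import List
--
-- def countExcellentPairs(nums: List[int], k: int) -> int:
--     counter = Counter(map(int.bit_count, set(nums)))
--     total = 0
--     for bit1 in counter:
--         for bit2 in counter:
--             if bit1 + bit2 >= k:
--                 total += counter[bit1]*counter[bit2]
--     return total
-- ===== SOURCE B (Python) =====
-- def countExcellentPairs(nums, k):
--     bits = sorted(v.bit_count() for v in set(nums))
--     n = len(bits)
--     total = 0
--     j = n  # first index (from the right) whose bit count still meets the threshold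
--     for b in bits:  # ascending, so the threshold k - b only decreases and j only moves left
--         while j > 0 and bits[j - 1] + b >= k:
--             j -= 1
--         total += n - j
--     return total
-- ===== Notes on version B (the rewrite author's own statement) =====
-- stated objective: alternative
-- what changed: Replaces the Counter-keyed quadratic double loop over distinct bit-count values with sorting the bit counts of the distinct numbers and a single monotone two-pointer sweep that counts, for each bit count, how many partners meet the threshold.
import Mathlib
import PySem

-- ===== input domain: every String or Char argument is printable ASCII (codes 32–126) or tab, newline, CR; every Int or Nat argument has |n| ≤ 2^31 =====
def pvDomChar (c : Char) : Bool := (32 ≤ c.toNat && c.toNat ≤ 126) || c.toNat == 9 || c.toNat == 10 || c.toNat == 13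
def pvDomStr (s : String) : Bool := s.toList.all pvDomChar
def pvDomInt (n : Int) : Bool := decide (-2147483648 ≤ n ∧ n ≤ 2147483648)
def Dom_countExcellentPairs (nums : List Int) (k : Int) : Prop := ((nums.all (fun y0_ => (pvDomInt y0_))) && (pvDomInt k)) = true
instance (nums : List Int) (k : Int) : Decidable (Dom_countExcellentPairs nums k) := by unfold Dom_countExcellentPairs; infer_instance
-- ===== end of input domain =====

-- B replaces A's Counter-keyed double loop by sorting the bit counts of the distinct numbers and
-- a single monotone two-pointer sweep (objective: alternative algorithm).

-- ===== PORT A =====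
-- shared helper: both Pythons compute map(int.bit_count, set(nums)); the multiset of bit counts
-- does not depend on the set's iteration order, and both ports consume it order-independently.
def pvBits (nums : List Int) : List Int :=
  (PySem.Set.ofList nums).map (fun v => (PySem.Int.bitCount v : Int))

-- counter = Counter(map(int.bit_count, set(nums))); the double loop over its keys is a sum,
-- hence independent of the (hash) iteration order CPython would use.
def countExcellentPairs (nums : List Int) (k : Int) : Int :=
  let counter := PySem.Dict.counter (pvBits nums)
  counter.keys.foldl (fun total b1 =>
    counter.keys.foldl (fun total b2 =>
      if b1 + b2 ≥ k then total + counter.getD b1 0 * counter.getD b2 0 else total) total) 0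

-- ===== PORT B =====
-- 'while j > 0 and bits[j-1] + b >= k: j -= 1'; bits[j-1] has 0 ≤ j-1 < len(bits) whenever the
-- loop body tests it (j > 0, and j never exceeds len(bits)), so getD is exact there.
def pvDrop (bits : List Int) (k b : Int) : Nat → Nat
  | 0 => 0
  | j + 1 => if bits.getD j 0 + b ≥ k then pvDrop bits k b j else j + 1

def countExcellentPairs_alt (nums : List Int) (k : Int) : Int :=
  let bits := PySem.List.sorted (pvBits nums) (fun x => x) false
  let n := bits.length
  (bits.foldl (fun (st : Nat × Int) b =>
      let j := pvDrop bits k b st.1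
      (j, st.2 + ((n : Int) - (j : Int)))) (n, 0)).2

-- ===== PRECONDITION & SPEC =====
def Spec_countExcellentPairs (nums : List Int) (k : Int) (out : Int) : Prop := out = countExcellentPairs_alt nums k
instance (nums : List Int) (k : Int) (out : Int) : Decidable (Spec_countExcellentPairs nums k out) := by unfold Spec_countExcellentPairs; infer_instance

-- ===== CLAIM (what is proved, stated in full; the proofs are below) =====
def Claim_equal_countExcellentPairs : Prop := ∀ (nums : List Int) (k : Int), Dom_countExcellentPairs nums k → Spec_countExcellentPairs nums k (countExcellentPairs nums k)

-- ===== LEMMAS AND PROOFS =====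

-- Σ over a Nodup list of (if b = x then g b else 0) is g x when x is in the list.
lemma sum_ite_single (K : List Int) (g : Int → Int) (x : Int) (hnd : K.Nodup) (hx : x ∈ K) :
    (K.map (fun b => if b = x then g b else 0)).sum = g x := by
  induction K with
  | nil => cases hx
  | cons a K ih =>
    rcases List.mem_cons.mp hx with h | h
    · subst h
      have h0 : (K.map (fun b => if b = x then g b else 0)).sum = 0 := by
        apply List.sum_eq_zero
        intro y hy
        obtain ⟨b, hb, rfl⟩ := List.mem_map.mp hy
        have hba : b ≠ x := fun e => (List.nodup_cons.mp hnd).1 (e ▸ hb)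
        simp [hba]
      simp [h0]
    · have hax : a ≠ x := fun e => (List.nodup_cons.mp hnd).1 (e ▸ h)
      simp [hax, ih (List.nodup_cons.mp hnd).2 h]

-- grouping: a key-indexed sum weighted by multiplicities equals the plain sum over the list.
lemma group_sum (L K : List Int) (g : Int → Int) (hnd : K.Nodup) (hsub : ∀ x ∈ L, x ∈ K) :
    (K.map (fun b => (L.count b : Int) * g b)).sum = (L.map g).sum := by
  induction L with
  | nil => simp
  | cons x L ih =>
    have hx : x ∈ K := hsub x (by simp)
    have hsub' : ∀ y ∈ L, y ∈ K := fun y hy => hsub y (by simp [hy])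
    have hsplit : ∀ b ∈ K, ((x :: L).count b : Int) * g b
        = (L.count b : Int) * g b + (if b = x then g b else 0) := by
      intro b _
      by_cases h : b = x
      · subst h; simp [List.count_cons_self]; ring
      · have hc : List.count b (x :: L) = List.count b L := List.count_cons_of_ne (Ne.symm h)
        simp [hc, h]
    rw [List.map_congr_left hsplit, PySem.List.sum_map_add_int, ih hsub',
        sum_ite_single K g x hnd hx]
    simp [add_comm]

-- A's double loop over the Counter is the elementwise pair count.
lemma A_eq (nums : List Int) (k : Int) :
    countExcellentPairs nums k
      = ((pvBits nums).map (fun x =>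
          (((pvBits nums).countP (fun y => decide (k ≤ x + y))) : Int))).sum := by
  unfold countExcellentPairs
  simp only [PySem.Dict.keys_counter, PySem.Dict.getD_counter]
  set L := pvBits nums with hL
  set K := PySem.Set.ofList L with hK
  have hnd : K.Nodup := PySem.Set.nodup_ofList L
  have hsub : ∀ x ∈ L, x ∈ K := fun x hx => (PySem.Set.mem_ofList L x).mpr hx
  have hinner : ∀ (t b1 : Int),
      K.foldl (fun total b2 =>
          if b1 + b2 ≥ k then total + (L.count b1 : Int) * (L.count b2 : Int) else total) t
        = t + (L.count b1 : Int) * (L.countP (fun y => decide (k ≤ b1 + y)) : Int) := by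
    intro t b1
    rw [PySem.List.foldl_congr_mem K _
        (fun total b2 => total + (L.count b2 : Int) * ((L.count b1 : Int) * (if k ≤ b1 + b2 then 1 else 0)))
        t ?_]
    · rw [PySem.List.foldl_add]
      congr 1
      rw [group_sum L K _ hnd hsub]
      have : ∀ y : Int, (L.count b1 : Int) * (if k ≤ b1 + y then 1 else 0)
          = (L.count b1 : Int) * (if (fun y => decide (k ≤ b1 + y)) y = true then 1 else 0) := by
        intro y; simp
      rw [List.map_congr_left (fun y _ => this y), List.sum_map_mul_left,
          PySem.List.sum_map_ite_one_zero]
    · intro acc x _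
      by_cases h : k ≤ b1 + x
      · simp only [ge_iff_le, if_pos h]; ring
      · simp only [ge_iff_le, if_neg h]; ring
  rw [PySem.List.foldl_congr_mem K _
      (fun total b1 => total + (L.count b1 : Int) * (L.countP (fun y => decide (k ≤ b1 + y)) : Int))
      0 (fun acc x _ => hinner acc x)]
  rw [PySem.List.foldl_add, group_sum L K _ hnd hsub]
  simp

lemma getD_mono (S : List Int) (hpw : S.Pairwise (· ≤ ·)) (i j : Nat)
    (hij : i ≤ j) (hj : j < S.length) : S.getD i 0 ≤ S.getD j 0 := by
  rcases Nat.lt_or_ge i j with h | h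
  · have hi : i < S.length := lt_trans h hj
    rw [List.getD_eq_getElem S 0 hi, List.getD_eq_getElem S 0 hj]
    exact List.pairwise_iff_getElem.mp hpw i j hi hj h
  · have : i = j := le_antisymm hij h
    subst this; exact le_refl _

-- pvDrop stops exactly at the first index whose entry still meets the threshold.
lemma pvDrop_spec (S : List Int) (k b : Int) (hpw : S.Pairwise (· ≤ ·)) :
    ∀ (j : Nat), j ≤ S.length → (∀ i, j ≤ i → i < S.length → k ≤ S.getD i 0 + b) →
      pvDrop S k b j ≤ j
      ∧ (∀ i, pvDrop S k b j ≤ i → i < S.length → k ≤ S.getD i 0 + b)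
      ∧ (∀ i, i < pvDrop S k b j → i < S.length → ¬ k ≤ S.getD i 0 + b) := by
  intro j
  induction j with
  | zero =>
    intro _ hinv
    exact ⟨le_refl _, by simpa [pvDrop] using hinv, by intro i hi; cases hi⟩
  | succ j ih =>
    intro hj hinv
    by_cases h : S.getD j 0 + b ≥ k
    · have hinv' : ∀ i, j ≤ i → i < S.length → k ≤ S.getD i 0 + b := by
        intro i hji hilen
        rcases Nat.eq_or_lt_of_le hji with rfl | hlt
        · exact h
        · exact hinv i hlt hilen
      obtain ⟨h1, h2, h3⟩ := ih (Nat.le_of_succ_le hj) hinv'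
      have hd : pvDrop S k b (j + 1) = pvDrop S k b j := if_pos h
      rw [hd]
      exact ⟨Nat.le_succ_of_le h1, h2, h3⟩
    · have hd : pvDrop S k b (j + 1) = j + 1 := if_neg h
      rw [hd]
      refine ⟨le_refl _, hinv, ?_⟩
      intro i hi hilen
      have hjlen : j < S.length := hj
      have hmono := getD_mono S hpw i j (Nat.lt_succ_iff.mp hi) hjlen
      intro hk
      exact h (le_trans hk (by linarith))

lemma countP_of_index_split (S : List Int) (p : Int → Bool) (j : Nat) (hj : j ≤ S.length)
    (h1 : ∀ i, i < j → i < S.length → p (S.getD i 0) = false)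
    (h2 : ∀ i, j ≤ i → i < S.length → p (S.getD i 0) = true) :
    S.countP p = S.length - j := by
  conv_lhs => rw [← List.take_append_drop j S]
  rw [List.countP_append]
  have htake : (S.take j).countP p = 0 := by
    apply List.countP_eq_zero.mpr
    intro a ha
    obtain ⟨i, hi, rfl⟩ := List.mem_take_iff_getElem.mp ha
    have hij : i < j := lt_of_lt_of_le hi (min_le_left _ _)
    have hlen : i < S.length := lt_of_lt_of_le hi (min_le_right _ _)
    have := h1 i hij hlen
    rw [List.getD_eq_getElem S 0 hlen] at this
    simp [this]
  have hdrop : (S.drop j).countP p = (S.drop j).length := by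
    apply List.countP_eq_length.mpr
    intro a ha
    obtain ⟨i, hi, rfl⟩ := List.mem_iff_getElem.mp ha
    rw [List.getElem_drop]
    have hlen : j + i < S.length := by
      have := hi; rw [List.length_drop] at this; omega
    have := h2 (j + i) (Nat.le_add_right _ _) hlen
    rw [List.getD_eq_getElem S 0 hlen] at this
    exact this
  rw [htake, hdrop, List.length_drop]; omega

-- the two-pointer sweep accumulates exactly the per-element partner counts.
lemma fold_go (S : List Int) (k : Int) (hpw : S.Pairwise (· ≤ ·)) :
    ∀ (rest : List Int) (j : Nat) (t : Int),
      rest.Pairwise (· ≤ ·) →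
      j ≤ S.length →
      (∀ b ∈ rest, ∀ i, j ≤ i → i < S.length → k ≤ S.getD i 0 + b) →
      (rest.foldl (fun (st : Nat × Int) b =>
          (pvDrop S k b st.1, st.2 + ((S.length : Int) - (pvDrop S k b st.1 : Int)))) (j, t)).2
        = t + (rest.map (fun b => ((S.countP (fun y => decide (k ≤ y + b))) : Int))).sum := by
  intro rest
  induction rest with
  | nil => intro j t _ _ _; simp
  | cons b tail ih =>
    intro j t hrest hj hinv
    have hinvb : ∀ i, j ≤ i → i < S.length → k ≤ S.getD i 0 + b :=
      hinv b (by simp)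
    obtain ⟨hle, hpost, hneg⟩ := pvDrop_spec S k b hpw j hj hinvb
    set j' := pvDrop S k b j with hj'
    have hj'len : j' ≤ S.length := le_trans hle hj
    have hcount : S.countP (fun y => decide (k ≤ y + b)) = S.length - j' := by
      apply countP_of_index_split S _ j' hj'len
      · intro i hi hilen
        have := hneg i hi hilen
        simp only [decide_eq_false_iff_not]
        intro hk; exact this (by linarith)
      · intro i hi hilen
        have := hpost i hi hilen
        simp only [decide_eq_true_eq]
        linarith
    have hinv' : ∀ b'' ∈ tail, ∀ i, j' ≤ i → i < S.length → k ≤ S.getD i 0 + b'' := by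
      intro b'' hb'' i hi hilen
      have hb : b ≤ b'' := (List.pairwise_cons.mp hrest).1 b'' hb''
      have := hpost i hi hilen
      linarith
    have htail := ih j' (t + ((S.length : Int) - (j' : Int)))
      (List.pairwise_cons.mp hrest).2 hj'len hinv'
    simp only [List.foldl_cons]
    rw [htail]
    have hcast : ((S.countP (fun y => decide (k ≤ y + b)) : Nat) : Int)
        = (S.length : Int) - (j' : Int) := by
      rw [hcount]; omega
    simp [hcast]
    ring

lemma B_eq (nums : List Int) (k : Int) :
    countExcellentPairs_alt nums k
      = ((PySem.List.sorted (pvBits nums) (fun x => x) false).map (fun b =>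
          (((PySem.List.sorted (pvBits nums) (fun x => x) false).countP
              (fun y => decide (k ≤ y + b))) : Int))).sum := by
  unfold countExcellentPairs_alt
  set S := PySem.List.sorted (pvBits nums) (fun x => x) false with hS
  have hpw : S.Pairwise (· ≤ ·) := by
    simpa using PySem.List.sorted_pairwise (pvBits nums) (fun x => x)
  have := fold_go S k hpw S S.length 0 hpw (le_refl _) (by intro b _ i hi hilen; omega)
  simpa using this

-- both elementwise pair counts agree: the lists are permutations and + commutes.
lemma bridge (S L : List Int) (k : Int) (hperm : S.Perm L) :
    (S.map (fun b => ((S.countP (fun y => decide (k ≤ y + b))) : Int))).sum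
      = (L.map (fun x => ((L.countP (fun y => decide (k ≤ x + y))) : Int))).sum := by
  have hmap : ∀ b ∈ S, ((S.countP (fun y => decide (k ≤ y + b))) : Int)
      = ((L.countP (fun y => decide (k ≤ b + y))) : Int) := by
    intro b _
    rw [hperm.countP_eq]
    congr 1
    apply List.countP_congr
    intro y _
    simp [Int.add_comm]
  rw [List.map_congr_left hmap]
  exact (hperm.map _).sum_eq

-- ===== VERDICT (by name: the statement is the Claim_ definition above) =====
theorem countExcellentPairs_spec : Claim_equal_countExcellentPairs := by
  intro nums k _
  show countExcellentPairs nums k = countExcellentPairs_alt nums k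
  rw [A_eq, B_eq, bridge _ _ k (PySem.List.sorted_perm (pvBits nums) (fun x => x) false)]
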